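-- pv_equiv track=rewrite | github.com/gameofpointers/entropic | src-tauri/resources/share/rnn-runtime/server.py | _split_inline_tool_arguments
-- ===== SOURCE A (Python) =====
-- from typing import Any, Dict, List, Optional
--
-- def _split_inline_tool_arguments(raw: str) -> List[str]:
--     parts: List[str] = []
--     current: List[str] = []
--     quote: Optional[str] = None
--     escape = False
--     depth = 0
--     for char in raw:
--         if escape:
--             current.append(char)
--             escape = False
--             continue
--         if quote:
--             current.append(char)
--             if char == "\\":
--                 escape = True
--             elif char == quote:
--                 quote = None
--             continue
--         if char in {'"', "'"}:
--             quote = char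
--             current.append(char)
--             continue
--         if char in "{[(":
--             depth += 1
--             current.append(char)
--             continue
--         if char in "}])":
--             depth = max(0, depth - 1)
--             current.append(char)
--             continue
--         if char == "," and depth == 0:
--             part = "".join(current).strip()
--             if part:
--                 parts.append(part)
--             current = []
--             continue
--         current.append(char)
--     tail = "".join(current).strip()
--     if tail:
--         parts.append(tail)
--     return parts
-- ===== SOURCE B (Python) =====
-- from typing import List, Optional
--
--
-- def _split_inline_tool_arguments(raw: str) -> List[str]:
--     # Pass 1: record the indices of depth-0, unquoted, unescaped commas.
--     cuts: List[int] = []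
--     quote: Optional[str] = None
--     escape = False
--     depth = 0
--     for i, char in enumerate(raw):
--         if escape:
--             escape = False
--         elif quote:
--             if char == "\\":
--                 escape = True
--             elif char == quote:
--                 quote = None
--         elif char in {'"', "'"}:
--             quote = char
--         elif char in "{[(":
--             depth += 1
--         elif char in "}])":
--             depth = max(0, depth - 1)
--         elif char == "," and depth == 0:
--             cuts.append(i)
--     # Pass 2: slice raw between consecutive boundaries, strip, keep non-empty.
--     starts = [0] + [c + 1 for c in cuts]
--     ends = cuts + [len(raw)]
--     parts: List[str] = []
--     for a, b in zip(starts, ends):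
--         piece = raw[a:b].strip()
--         if piece:
--             parts.append(piece)
--     return parts
-- ===== Notes on version B (the rewrite author's own statement) =====
-- stated objective: alternative
-- what changed: Instead of accumulating characters into a growing buffer and emitting parts during the scan, B only records the indices of depth-0 splitting commas in one scan and then builds the parts in a second pass by slicing raw between consecutive boundaries, stripping and filtering each slice.
import Mathlib
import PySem

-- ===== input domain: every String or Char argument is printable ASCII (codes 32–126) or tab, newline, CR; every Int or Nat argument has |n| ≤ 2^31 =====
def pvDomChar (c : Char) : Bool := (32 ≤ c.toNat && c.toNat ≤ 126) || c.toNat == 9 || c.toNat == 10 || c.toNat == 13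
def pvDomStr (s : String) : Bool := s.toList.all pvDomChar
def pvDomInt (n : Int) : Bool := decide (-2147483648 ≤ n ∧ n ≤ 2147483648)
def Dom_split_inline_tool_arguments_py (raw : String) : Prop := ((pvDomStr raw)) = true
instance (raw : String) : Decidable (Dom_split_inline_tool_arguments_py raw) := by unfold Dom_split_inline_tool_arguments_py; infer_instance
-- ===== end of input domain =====

-- B replaces A's character-accumulating single pass by a pass that only records the
-- indices of the depth-0 splitting commas, then a second pass slices raw between
-- consecutive boundaries; same cost, different decomposition ("alternative").

-- ===== PORT A =====
-- the for-loop of A: state (parts, current, quote, escape, depth); returns (parts, current)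
def aLoop : List Char → List String → List Char → Option Char → Bool → Nat → List String × List Char
  | [], parts, current, _, _, _ => (parts, current)
  | c :: cs, parts, current, q, e, d =>
    if e then aLoop cs parts (current ++ [c]) q false d
    else
      match q with
      | some qc =>
        if c = '\\' then aLoop cs parts (current ++ [c]) (some qc) true d
        else if c = qc then aLoop cs parts (current ++ [c]) none false d
        else aLoop cs parts (current ++ [c]) (some qc) false d
      | none =>
        if c = '"' ∨ c = '\'' then aLoop cs parts (current ++ [c]) (some c) false d
        else if c = '{' ∨ c = '[' ∨ c = '(' then aLoop cs parts (current ++ [c]) none false (d + 1)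
        else if c = '}' ∨ c = ']' ∨ c = ')' then aLoop cs parts (current ++ [c]) none false (d - 1)
        else if c = ',' ∧ d = 0 then
          let part := PySem.Str.strip (String.ofList current)
          aLoop cs (if part ≠ "" then parts ++ [part] else parts) [] none false d
        else aLoop cs parts (current ++ [c]) none false d

def split_inline_tool_arguments_py (raw : String) : List String :=
  match aLoop raw.toList [] [] none false 0 with
  | (parts, current) =>
    let tail := PySem.Str.strip (String.ofList current)
    if tail ≠ "" then parts ++ [tail] else parts

-- ===== PORT B =====
-- pass 1 of B: the same quote/escape/depth machine, but only collecting comma indices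
def bCuts : List Char → Nat → Option Char → Bool → Nat → List Nat → List Nat
  | [], _, _, _, _, cuts => cuts
  | c :: cs, i, q, e, d, cuts =>
    if e then bCuts cs (i + 1) q false d cuts
    else
      match q with
      | some qc =>
        if c = '\\' then bCuts cs (i + 1) (some qc) true d cuts
        else if c = qc then bCuts cs (i + 1) none false d cuts
        else bCuts cs (i + 1) (some qc) false d cuts
      | none =>
        if c = '"' ∨ c = '\'' then bCuts cs (i + 1) (some c) false d cuts
        else if c = '{' ∨ c = '[' ∨ c = '(' then bCuts cs (i + 1) none false (d + 1) cuts
        else if c = '}' ∨ c = ']' ∨ c = ')' then bCuts cs (i + 1) none false (d - 1) cuts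
        else if c = ',' ∧ d = 0 then bCuts cs (i + 1) none false d (cuts ++ [i])
        else bCuts cs (i + 1) none false d cuts

-- the body of B's second loop: raw[a:b] (here 0 ≤ a ≤ b ≤ len), strip, keep when non-empty
def bStep (chars : List Char) (parts : List String) (p : Nat × Nat) : List String :=
  let piece := PySem.Str.strip (String.ofList (PySem.List.slice chars (some (p.1 : Int)) (some (p.2 : Int))))
  if piece ≠ "" then parts ++ [piece] else parts

def split_inline_tool_arguments_py_alt (raw : String) : List String :=
  let chars := raw.toList
  let cuts := bCuts chars 0 none false 0 []
  let starts := 0 :: cuts.map (· + 1)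
  let ends := cuts ++ [chars.length]
  (starts.zip ends).foldl (bStep chars) []

-- ===== PRECONDITION & SPEC =====
def Spec_split_inline_tool_arguments_py (raw : String) (out : List String) : Prop := out = split_inline_tool_arguments_py_alt raw
instance (raw : String) (out : List String) : Decidable (Spec_split_inline_tool_arguments_py raw out) := by unfold Spec_split_inline_tool_arguments_py; infer_instance

-- ===== CLAIM (what is proved, stated in full; the proofs are below) =====
def Claim_equal_split_inline_tool_arguments_py : Prop := ∀ (raw : String), Dom_split_inline_tool_arguments_py raw → Spec_split_inline_tool_arguments_py raw (split_inline_tool_arguments_py raw)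

-- ===== LEMMAS AND PROOFS =====

-- A's epilogue (the code after the loop), as a function of the loop's final state
def finishA (pc : List String × List Char) : List String :=
  let tail := PySem.Str.strip (String.ofList pc.2)
  if tail ≠ "" then pc.1 ++ [tail] else pc.1

-- the (start, end) boundary pairs determined by the cut indices
def goAll : Nat → List Nat → Nat → List (Nat × Nat)
  | s, [], len => [(s, len)]
  | s, c :: cs, len => (s, c) :: goAll (c + 1) cs len

theorem zip_eq_goAll : ∀ (cuts : List Nat) (s len : Nat),
    (s :: cuts.map (· + 1)).zip (cuts ++ [len]) = goAll s cuts len := by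
  intro cuts
  induction cuts with
  | nil => intro s len; simp [goAll]
  | cons c cs ih => intro s len; simp [goAll, ih]

theorem bCuts_acc : ∀ (cs : List Char) (i : Nat) (q : Option Char) (e : Bool) (d : Nat)
    (cuts : List Nat), bCuts cs i q e d cuts = cuts ++ bCuts cs i q e d [] := by
  intro cs
  induction cs with
  | nil => intro i q e d cuts; simp [bCuts]
  | cons c cs ih =>
    intro i q e d cuts
    cases e with
    | true =>
      simp only [bCuts, reduceIte]
      apply ih
    | false =>
      cases q with
      | some qc =>
        simp only [bCuts, Bool.false_eq_true, if_false]
        split_ifs <;> apply ih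
      | none =>
        simp only [bCuts, Bool.false_eq_true, if_false]
        split_ifs <;> try (apply ih)
        simp only [List.nil_append]
        rw [ih (i + 1) none false d (cuts ++ [i]), ih (i + 1) none false d [i]]
        simp

theorem cur_snoc {chars cs : List Char} {c : Char} {i s : Nat}
    (h : chars.drop i = c :: cs) (hs : s ≤ i) :
    (chars.drop s).take (i + 1 - s) = (chars.drop s).take (i - s) ++ [c] := by
  have hget : chars[i]? = some c := by
    have h0 : (chars.drop i)[0]? = some c := by rw [h]; rfl
    rw [List.getElem?_drop] at h0
    simpa using h0
  have h2 : (chars.drop s)[i - s]? = some c := by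
    rw [List.getElem?_drop, show s + (i - s) = i from by omega]
    exact hget
  rw [show i + 1 - s = (i - s) + 1 from by omega, List.take_add_one, h2]
  rfl

theorem main_loop : ∀ (cs chars : List Char) (i s : Nat) (parts : List String)
    (q : Option Char) (e : Bool) (d : Nat),
    chars.drop i = cs → s ≤ i → i ≤ chars.length →
    finishA (aLoop cs parts ((chars.drop s).take (i - s)) q e d)
      = (goAll s (bCuts cs i q e d []) chars.length).foldl (bStep chars) parts := by
  intro cs
  induction cs with
  | nil =>
    intro chars i s parts q e d hdrop hs hi
    have hlen : i = chars.length := by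
      have := List.drop_eq_nil_iff.mp hdrop; omega
    subst hlen
    simp only [aLoop, bCuts, goAll, List.foldl, finishA, bStep, PySem.List.slice_natCast]
  | cons c cs ih =>
    intro chars i s parts q e d hdrop hs hi
    have hi' : i < chars.length := by
      have := congrArg List.length hdrop; simp at this; omega
    have hdrop' : chars.drop (i + 1) = cs := by
      rw [← List.tail_drop, hdrop]; rfl
    have hsnoc := cur_snoc hdrop hs
    cases e with
    | true =>
      simp only [aLoop, bCuts, reduceIte, ← hsnoc]
      exact ih chars (i + 1) s parts q false d hdrop' (by omega) (by omega)
    | false =>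
      cases q with
      | some qc =>
        simp only [aLoop, bCuts]
        by_cases h1 : c = '\\'
        · simp only [if_pos h1, ← hsnoc]
          exact ih chars (i + 1) s parts (some qc) true d hdrop' (by omega) (by omega)
        · simp only [if_neg h1]
          by_cases h2 : c = qc
          · simp only [if_pos h2, ← hsnoc]
            exact ih chars (i + 1) s parts none false d hdrop' (by omega) (by omega)
          · simp only [if_neg h2, ← hsnoc]
            exact ih chars (i + 1) s parts (some qc) false d hdrop' (by omega) (by omega)
      | none =>
        simp only [aLoop, bCuts]
        by_cases h1 : c = '"' ∨ c = '\''
        · simp only [if_pos h1, ← hsnoc]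
          exact ih chars (i + 1) s parts (some c) false d hdrop' (by omega) (by omega)
        · simp only [if_neg h1]
          by_cases h2 : c = '{' ∨ c = '[' ∨ c = '('
          · simp only [if_pos h2, ← hsnoc]
            exact ih chars (i + 1) s parts none false (d + 1) hdrop' (by omega) (by omega)
          · simp only [if_neg h2]
            by_cases h3 : c = '}' ∨ c = ']' ∨ c = ')'
            · simp only [if_pos h3, ← hsnoc]
              exact ih chars (i + 1) s parts none false (d - 1) hdrop' (by omega) (by omega)
            · simp only [if_neg h3]
              by_cases h4 : c = ',' ∧ d = 0
              · simp only [if_pos h4, Bool.false_eq_true, if_false, List.nil_append]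
                rw [bCuts_acc cs (i + 1) none false d [i]]
                rw [show ([i] ++ bCuts cs (i + 1) none false d [] : List Nat)
                      = i :: bCuts cs (i + 1) none false d [] from rfl]
                rw [show goAll s (i :: bCuts cs (i + 1) none false d []) chars.length
                      = (s, i) :: goAll (i + 1) (bCuts cs (i + 1) none false d []) chars.length
                    from rfl, List.foldl_cons]
                have hb : bStep chars parts (s, i)
                    = if PySem.Str.strip (String.ofList ((chars.drop s).take (i - s))) ≠ ""
                        then parts ++ [PySem.Str.strip (String.ofList ((chars.drop s).take (i - s)))]
                        else parts := by
                  simp [bStep, PySem.List.slice_natCast]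
                rw [← hb]
                have := ih chars (i + 1) (i + 1) (bStep chars parts (s, i)) none false d hdrop'
                  (by omega) (by omega)
                simpa using this
              · simp only [if_neg h4, ← hsnoc]
                exact ih chars (i + 1) s parts none false d hdrop' (by omega) (by omega)

-- ===== VERDICT (by name: the statement is the Claim_ definition above) =====
theorem split_inline_tool_arguments_py_spec : Claim_equal_split_inline_tool_arguments_py := by
  intro raw _
  show split_inline_tool_arguments_py raw = split_inline_tool_arguments_py_alt raw
  have key := main_loop raw.toList raw.toList 0 0 [] none false 0 rfl (le_refl 0) (Nat.zero_le _)
  simp only [List.drop_zero, Nat.sub_self, List.take_zero] at key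
  rcases h : aLoop raw.toList [] [] none false 0 with ⟨P, C⟩
  rw [h] at key
  simp only [split_inline_tool_arguments_py, split_inline_tool_arguments_py_alt, h, zip_eq_goAll]
  rw [← key]
  simp [finishA]
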